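-- pv_equiv track=rewrite | github.com/dwpplumb/Axiomatic-Resonance-Topic | GMF/gmf_demo_extended_cli.py | discover_smallest_linear_factor
-- ===== SOURCE A (Python) =====
-- from math import gcd
--
-- def NontrivialGCD(x:int, N:int)->int:
--     d = gcd(x, N)
--     return d if (d != 1 and d != N) else 1
--
-- def _run_steps_only_with_k(N:int, k:int):
--     u = 1
--     for _ in range(8):
--         u = (u * k) % N
--         d = NontrivialGCD(u, N)
--         if d != 1:
--             return d, 1
--     return 1, 8
--
-- def discover_smallest_linear_factor(N:int, kmax:int=10_000)->int:
--     if N % 2 == 0: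
--         return 2
--     for k in range(3, kmax+1, 2):
--         d, _ = _run_steps_only_with_k(N, k)
--         if d != 1:
--             return d
--     return 1
-- ===== SOURCE B (Python) =====
-- def discover_smallest_linear_factor(N: int, kmax: int = 10_000) -> int:
--     # Trial division: the only k the scan in A can stop at is the smallest odd
--     # prime factor p of |N| (and only when gcd(k, N) is a nontrivial divisor).
--     if N % 2 == 0:
--         return 2
--     m = abs(N)
--     p = m
--     d = 3
--     while d * d <= m:
--         if m % d == 0:
--             p = d
--             break
--         d += 2
--     if p > 1 and p <= kmax and not (N > 0 and p == N):
--         return p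
--     return 1
-- ===== Notes on version B (the rewrite author's own statement) =====
-- stated objective: faster
-- what changed: Replaces the scan over all odd k up to kmax (with an 8-step power loop and gcd per k) by direct trial division up to sqrt(|N|) computing the smallest odd prime factor, then a constant-time check of the return conditions.
import Mathlib
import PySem

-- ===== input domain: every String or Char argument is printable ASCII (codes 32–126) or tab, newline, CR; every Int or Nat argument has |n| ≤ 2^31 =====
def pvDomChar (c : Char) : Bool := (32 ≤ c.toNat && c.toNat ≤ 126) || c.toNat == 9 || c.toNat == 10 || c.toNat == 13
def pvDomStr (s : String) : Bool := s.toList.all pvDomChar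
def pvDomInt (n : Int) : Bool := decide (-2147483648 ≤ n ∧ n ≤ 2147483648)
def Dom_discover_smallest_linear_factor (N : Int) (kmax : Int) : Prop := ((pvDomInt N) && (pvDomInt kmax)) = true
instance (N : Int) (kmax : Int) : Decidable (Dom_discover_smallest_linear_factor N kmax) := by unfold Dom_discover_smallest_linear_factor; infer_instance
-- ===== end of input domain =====

-- B replaces A's scan of every odd k up to kmax (8 modular powers + gcd each) by trial
-- division up to sqrt(|N|) for the smallest odd prime factor; objective: faster.

-- ===== PORT A =====
-- math.gcd(x, N) is the nonnegative gcd of the absolute values = Int.gcd (a Nat), cast to Int.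
def pvNontrivialGCD (x : Int) (N : Int) : Int :=
  let d : Int := Int.gcd x N
  if d ≠ 1 ∧ d ≠ N then d else 1

-- the 'for _ in range(8)' loop of _run_steps_only_with_k, as structural recursion on the
-- remaining iteration count; state u is threaded unchanged.
def pvRunAux (N : Int) (k : Int) (u : Int) : Nat → Int × Int
  | 0 => (1, 8)
  | n + 1 =>
    let u' := PySem.Int.mod (u * k) N
    let d := pvNontrivialGCD u' N
    if d ≠ 1 then (d, 1) else pvRunAux N k u' n

def pvRunSteps (N : Int) (k : Int) : Int × Int := pvRunAux N k 1 8

-- the 'for k in range(3, kmax+1, 2)' loop with its early return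
def pvScanA (N : Int) : List Int → Int
  | [] => 1
  | k :: ks =>
    let d := (pvRunSteps N k).1
    if d ≠ 1 then d else pvScanA N ks

def discover_smallest_linear_factor (N : Int) (kmax : Int) : Int :=
  if PySem.Int.mod N 2 = 0 then 2
  else pvScanA N (PySem.List.pyRange 3 (kmax + 1) 2)

-- ===== PORT B =====
-- the 'while d*d <= m' trial-division loop of Source B (p is m unless the break fires at d)
def pvTrial (m : Nat) (d : Nat) : Nat :=
  if h : d * d ≤ m then
    if m % d = 0 then d else pvTrial m (d + 2)
  else m
termination_by m + 2 - d
decreasing_by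
  have hd : d ≤ m := by
    rcases Nat.eq_zero_or_pos d with h0 | h0
    · omega
    · exact le_trans (Nat.le_mul_of_pos_left d h0) h
  omega

def discover_smallest_linear_factor_alt (N : Int) (kmax : Int) : Int :=
  if PySem.Int.mod N 2 = 0 then 2
  else
    let m := N.natAbs
    let p := pvTrial m 3
    if 1 < p ∧ (p : Int) ≤ kmax ∧ ¬(0 < N ∧ (p : Int) = N) then (p : Int) else 1

-- ===== PRECONDITION & SPEC =====
def Spec_discover_smallest_linear_factor (N : Int) (kmax : Int) (out : Int) : Prop := out = discover_smallest_linear_factor_alt N kmax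
instance (N : Int) (kmax : Int) (out : Int) : Decidable (Spec_discover_smallest_linear_factor N kmax out) := by unfold Spec_discover_smallest_linear_factor; infer_instance

-- ===== CLAIM (what is proved, stated in full; the proofs are below) =====
def Claim_equal_discover_smallest_linear_factor : Prop := ∀ (N : Int) (kmax : Int), Dom_discover_smallest_linear_factor N kmax → Spec_discover_smallest_linear_factor N kmax (discover_smallest_linear_factor N kmax)

-- ===== LEMMAS AND PROOFS =====

lemma gcd_fmod (a N : Int) : Int.gcd (Int.fmod a N) N = Int.gcd a N := by
  rw [Int.fmod_def, mul_comm N (a.fdiv N)]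
  exact Int.gcd_sub_mul_right_left N a (a.fdiv N)

lemma ntg_eq_of_gcd_eq {x y N : Int} (h : Int.gcd x N = Int.gcd y N) :
    pvNontrivialGCD x N = pvNontrivialGCD y N := by
  simp only [pvNontrivialGCD, h]

-- once gcd(u, N) = 1 and gcd(k, N) = 1 the inner loop never finds a factor
lemma runAux_coprime (N k : Int) (hk : Int.gcd k N = 1) :
    ∀ (n : Nat) (u : Int), Int.gcd u N = 1 → (pvRunAux N k u n).1 = 1 := by
  intro n
  induction n with
  | zero => intro u _; rfl
  | succ n ih =>
    intro u hu
    have hg : Int.gcd (PySem.Int.mod (u * k) N) N = 1 := by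
      have h1 : Int.gcd (u * k) N = 1 := by
        rw [← Int.isCoprime_iff_gcd_eq_one] at hu hk ⊢
        exact IsCoprime.mul_left hu hk
      show Int.gcd (Int.fmod (u * k) N) N = 1
      rw [gcd_fmod]; exact h1
    simp only [pvRunAux, pvNontrivialGCD, hg]
    simpa using ih _ hg

-- once u = 0 (N positive) the loop only sees the trivial divisor N
lemma runAux_zero (N k : Int) (hN : 0 < N) : ∀ n : Nat, (pvRunAux N k 0 n).1 = 1 := by
  intro n
  induction n with
  | zero => rfl
  | succ n ih =>
    have h0 : PySem.Int.mod ((0 : Int) * k) N = 0 := by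
      show Int.fmod ((0 : Int) * k) N = 0
      simp [Int.zero_fmod]
    have hg : pvNontrivialGCD 0 N = 1 := by
      have hd : ((Int.gcd 0 N : Nat) : Int) = N := by
        simp [Int.gcd_def, Int.natAbs_of_nonneg hN.le]
      show (if ((Int.gcd 0 N : Nat) : Int) ≠ 1 ∧ ((Int.gcd 0 N : Nat) : Int) ≠ N
            then ((Int.gcd 0 N : Nat) : Int) else 1) = 1
      rw [hd, if_neg (by simp)]
    simp only [pvRunAux, h0, hg]
    simpa using ih

-- the whole inner loop returns exactly NontrivialGCD(k, N)
lemma run_char (N k : Int) (hodd : ¬ (2 : Int) ∣ N) :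
    (pvRunSteps N k).1 = pvNontrivialGCD k N := by
  have hN0 : N ≠ 0 := by rintro rfl; exact hodd ⟨0, rfl⟩
  have hmod : PySem.Int.mod ((1 : Int) * k) N = Int.fmod k N := by
    show Int.fmod ((1 : Int) * k) N = Int.fmod k N
    rw [one_mul]
  have hntg : pvNontrivialGCD (Int.fmod k N) N = pvNontrivialGCD k N :=
    ntg_eq_of_gcd_eq (gcd_fmod k N)
  show (pvRunAux N k 1 8).1 = pvNontrivialGCD k N
  rw [show (8 : Nat) = 7 + 1 from rfl]
  simp only [pvRunAux, hmod, hntg]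
  by_cases h1 : ((Int.gcd k N : Nat) : Int) ≠ 1 ∧ ((Int.gcd k N : Nat) : Int) ≠ N
  · have hd : pvNontrivialGCD k N = ((Int.gcd k N : Nat) : Int) := by
      simp [pvNontrivialGCD, h1]
    rw [hd, if_pos (by exact_mod_cast h1.1)]
  · have hd : pvNontrivialGCD k N = 1 := by
      simp only [pvNontrivialGCD]
      rw [if_neg h1]
    rw [hd, if_neg (by simp)]
    push_neg at h1
    by_cases hg1 : Int.gcd k N = 1
    · exact runAux_coprime N k hg1 7 _ (by rw [gcd_fmod]; exact hg1)
    · have hgN : ((Int.gcd k N : Nat) : Int) = N := h1 (by exact_mod_cast hg1)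
      have hNpos : 0 < N := by
        have : (0 : Int) ≤ (Int.gcd k N : Nat) := Int.natCast_nonneg _
        omega
      have hdvd : N ∣ k := hgN ▸ Int.gcd_dvd_left k N
      rw [Int.fmod_eq_zero_of_dvd hdvd]
      exact runAux_zero N k hNpos 7

lemma scan_all_one (N : Int) :
    ∀ L : List Int, (∀ k ∈ L, (pvRunSteps N k).1 = 1) → pvScanA N L = 1 := by
  intro L
  induction L with
  | nil => intro _; rfl
  | cons k ks ih =>
    intro h
    simp only [pvScanA, h k (by simp), ne_eq, not_true_eq_false, if_false]
    exact ih fun x hx => h x (by simp [hx])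

-- the odd arithmetic progression range(a, ·, 2), as proofs see it
def pvList (a : Int) (n : Nat) : List Int := (List.range n).map (fun i : Nat => a + 2 * (i : Int))

lemma pvList_succ (a : Int) (n : Nat) : pvList a (n + 1) = a :: pvList (a + 2) n := by
  unfold pvList
  rw [List.range_succ_eq_map, List.map_cons, List.map_map]
  congr 1
  · simp
  · refine List.map_congr_left ?_
    intro i _
    simp only [Function.comp_apply]
    push_cast
    ring

-- scanning the odd progression stops at p' with value NontrivialGCD(p', N)
lemma scan_hit (N : Int) (hodd : ¬ (2 : Int) ∣ N) (p' : Int) (hp2 : p' % 2 = 1)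
    (hbad : pvNontrivialGCD p' N ≠ 1) :
    ∀ (n : Nat) (a : Int), a % 2 = 1 → a ≤ p' → p' < a + 2 * n →
      (∀ k : Int, k % 2 = 1 → a ≤ k → k < p' → pvNontrivialGCD k N = 1) →
      pvScanA N (pvList a n) = pvNontrivialGCD p' N := by
  intro n
  induction n with
  | zero => intro a _ h1 h2 _; exfalso; push_cast at h2; omega
  | succ n ih =>
    intro a ha hale hlt hgood
    rw [pvList_succ]
    simp only [pvScanA, run_char N a hodd]
    by_cases heq : a = p'
    · subst heq; rw [if_pos hbad]
    · have h1 : pvNontrivialGCD a N = 1 := hgood a ha le_rfl (by omega)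
      rw [h1, if_neg (by simp)]
      refine ih (a + 2) (by omega) (by omega) (by push_cast at hlt ⊢; omega) ?_
      intro k hk h2 h3
      exact hgood k hk (by omega) h3

lemma odd_divisor_odd {m e : Nat} (hm : m % 2 = 1) (he : e ∣ m) : e % 2 = 1 := by
  by_contra h
  have h2 : 2 ∣ e := by omega
  have h3 : 2 ∣ m := h2.trans he
  omega

lemma minFac_eq_self_of_no_small (m d : Nat) (hm : m % 2 = 1) (hd : ¬ d * d ≤ m)
    (hmin : ∀ e, 1 < e → e ∣ m → d ≤ e) : m.minFac = m := by
  rcases eq_or_ne m 1 with rfl | hm1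
  · exact Nat.minFac_one
  · have hp : (m.minFac).Prime := Nat.minFac_prime hm1
    by_cases hprime : m.Prime
    · rcases hprime.eq_one_or_self_of_dvd m.minFac (Nat.minFac_dvd m) with h | h
      · exact absurd h hp.one_lt.ne'
      · exact h
    · exfalso
      have hpos : 0 < m := by omega
      have hsq := Nat.minFac_sq_le_self hpos hprime
      rw [pow_two] at hsq
      have hle : d ≤ m.minFac := hmin _ hp.one_lt (Nat.minFac_dvd m)
      exact hd ((Nat.mul_le_mul hle hle).trans hsq)

-- the trial-division loop computes the smallest prime factor of odd m (m itself if prime, 1 if m = 1)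
lemma trial_eq (m : Nat) (hm : m % 2 = 1) :
    ∀ c d, m + 2 - d ≤ c → 3 ≤ d → d % 2 = 1 →
      (∀ e, 1 < e → e ∣ m → d ≤ e) → pvTrial m d = m.minFac := by
  intro c
  induction c with
  | zero =>
    intro d hc _ _ hmin
    have hdm : ¬ d * d ≤ m := by
      intro h
      have : d ≤ d * d := Nat.le_mul_of_pos_left d (by omega)
      omega
    rw [pvTrial, dif_neg hdm]
    exact (minFac_eq_self_of_no_small m d hm hdm hmin).symm
  | succ c ih =>
    intro d hc h3 h2 hmin
    rw [pvTrial]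
    by_cases hdd : d * d ≤ m
    · rw [dif_pos hdd]
      by_cases hdvd : m % d = 0
      · rw [if_pos hdvd]
        have hddvd : d ∣ m := Nat.dvd_of_mod_eq_zero hdvd
        have hml : m.minFac ≤ d := Nat.minFac_le_of_dvd (by omega) hddvd
        have hm1 : m ≠ 1 := by
          rintro rfl
          have := Nat.le_of_dvd one_pos hddvd
          omega
        have hdl : d ≤ m.minFac := hmin _ (Nat.minFac_prime hm1).one_lt (Nat.minFac_dvd m)
        omega
      · rw [if_neg hdvd]
        refine ih (d + 2) (by omega) (by omega) (by omega) ?_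
        intro e he hedvd
        have hde : d ≤ e := hmin e he hedvd
        have heodd : e % 2 = 1 := odd_divisor_odd hm hedvd
        have hne : e ≠ d := by rintro rfl; exact hdvd (Nat.mod_eq_zero_of_dvd hedvd)
        omega
    · rw [dif_neg hdd]
      exact (minFac_eq_self_of_no_small m d hm hdd hmin).symm

-- every k below the smallest prime factor of |N| is coprime to N
lemma small_coprime (N : Int) (k : Int) (hk1 : 1 ≤ k)
    (hk : k < (N.natAbs.minFac : Int)) : Int.gcd k N = 1 := by
  by_contra h
  have hg0 : Int.gcd k N ≠ 0 := by
    intro h0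
    rw [Int.gcd_eq_zero_iff] at h0
    obtain ⟨rfl, -⟩ := h0
    omega
  have hg1 : 1 < Int.gcd k N := by omega
  have hgm : Int.gcd k N ∣ N.natAbs := by
    rw [Int.gcd_def]; exact Nat.gcd_dvd_right _ _
  have hmf : N.natAbs.minFac ≤ Int.gcd k N := Nat.minFac_le_of_dvd (by omega) hgm
  have hgk : ((Int.gcd k N : Nat) : Int) ∣ k := Int.gcd_dvd_left k N
  have hck : ((Int.gcd k N : Nat) : Int) ≤ k := Int.le_of_dvd (by omega) hgk
  omega

-- ===== VERDICT (by name: the statement is the Claim_ definition above) =====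
theorem discover_smallest_linear_factor_spec : Claim_equal_discover_smallest_linear_factor := by
  intro N kmax _
  unfold Spec_discover_smallest_linear_factor
  unfold discover_smallest_linear_factor discover_smallest_linear_factor_alt
  by_cases he : PySem.Int.mod N 2 = 0
  · rw [if_pos he, if_pos he]
  · rw [if_neg he, if_neg he]
    have hodd : ¬ (2 : Int) ∣ N := by rw [← PySem.Int.mod_eq_zero_iff_dvd]; exact he
    have hN0 : N ≠ 0 := by rintro rfl; exact hodd ⟨0, rfl⟩
    have hmodd : N.natAbs % 2 = 1 := by
      by_contra h
      have h2 : 2 ∣ N.natAbs := by omega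
      exact hodd (Int.natAbs_dvd_natAbs.mp (by simpa using h2))
    have htrial : pvTrial N.natAbs 3 = N.natAbs.minFac := by
      refine trial_eq N.natAbs hmodd (N.natAbs + 2 - 3) 3 le_rfl (by omega) (by omega) ?_
      intro e he1 hed
      have := odd_divisor_odd hmodd hed
      omega
    simp only [htrial]
    rw [PySem.List.pyRange_of_pos 3 (kmax + 1) (by omega : (0 : Int) < 2)]
    set p := N.natAbs.minFac with hpdef
    set nn : Nat := if (3 : Int) < kmax + 1 then ((kmax + 1 - 3 + 2 - 1) / 2).toNat else 0
      with hnn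
    have hfold : List.map (fun k : Nat => 3 + 2 * (k : Int)) (List.range nn) = pvList 3 nn := rfl
    rw [hfold]
    by_cases hc : 1 < p ∧ (p : Int) ≤ kmax ∧ ¬(0 < N ∧ (p : Int) = N)
    · rw [if_pos hc]
      obtain ⟨hp1, hpk, hnp⟩ := hc
      have hm1 : N.natAbs ≠ 1 := by
        intro h
        rw [hpdef, h, Nat.minFac_one] at hp1
        omega
      have hpprime : p.Prime := Nat.minFac_prime hm1
      have hpdvd : p ∣ N.natAbs := Nat.minFac_dvd _
      have hpodd : p % 2 = 1 := odd_divisor_odd hmodd hpdvd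
      have hgcdp : Int.gcd (p : Int) N = p := by
        rw [Int.gcd_def, Int.natAbs_natCast]
        exact Nat.gcd_eq_left hpdvd
      have hpneN : ((p : Nat) : Int) ≠ N := by
        rcases lt_or_gt_of_ne hN0 with hneg | hpos
        · intro hEq; omega
        · intro hEq; exact hnp ⟨hpos, hEq⟩
      have hbadp : pvNontrivialGCD (p : Int) N = (p : Int) := by
        simp only [pvNontrivialGCD, hgcdp]
        rw [if_pos ⟨by exact_mod_cast (by omega : p ≠ 1), hpneN⟩]
      have hwin : ((p : Nat) : Int) < 3 + 2 * (nn : Int) := by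
        have h3k : (3 : Int) < kmax + 1 := by omega
        rw [hnn, if_pos h3k]
        omega
      have := scan_hit N hodd (p : Int) (by omega) (by rw [hbadp]; exact_mod_cast (by omega : p ≠ 1))
        nn 3 (by omega) (by omega) hwin ?_
      · rw [this, hbadp]
      · intro k hk2 h3 hlt
        have hg := small_coprime N k (by omega) hlt
        simp [pvNontrivialGCD, hg]
    · rw [if_neg hc]
      refine scan_all_one N _ ?_
      intro k hk
      rw [run_char N k hodd]
      simp only [pvList, List.mem_map, List.mem_range] at hk
      obtain ⟨i, hi, rfl⟩ := hk
      have h3k : (3 : Int) < kmax + 1 := by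
        by_contra h
        rw [hnn, if_neg h] at hi
        omega
      rw [hnn, if_pos h3k] at hi
      have hkmax : 3 + 2 * (i : Int) ≤ kmax := by omega
      push_neg at hc
      by_cases hp1 : 1 < p
      · by_cases hpk : ((p : Nat) : Int) ≤ kmax
        · obtain ⟨hNpos, hpN⟩ := hc hp1 hpk
          have hm1 : N.natAbs ≠ 1 := by
            intro h
            rw [hpdef, h, Nat.minFac_one] at hp1
            omega
          have hmN : ((N.natAbs : Nat) : Int) = N := Int.natAbs_of_nonneg hNpos.le
          have hpm : p = N.natAbs := by omega
          have hgdvd : Int.gcd (3 + 2 * (i : Int)) N ∣ N.natAbs := by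
            rw [Int.gcd_def]; exact Nat.gcd_dvd_right _ _
          have hprime : N.natAbs.Prime := hpm ▸ Nat.minFac_prime hm1
          rcases hprime.eq_one_or_self_of_dvd _ hgdvd with h1 | hgm
          · simp [pvNontrivialGCD, h1]
          · simp only [pvNontrivialGCD]
            rw [if_neg]
            rintro ⟨-, hne⟩
            exact hne (by rw [hgm]; exact hmN)
        · have hg := small_coprime N (3 + 2 * (i : Int)) (by omega) (by omega)
          simp [pvNontrivialGCD, hg]
      · have hm1 : N.natAbs = 1 := by
          by_contra h
          exact hp1 (Nat.minFac_prime h).one_lt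
        have hg : Int.gcd (3 + 2 * (i : Int)) N = 1 := by
          rw [Int.gcd_def, hm1, Nat.gcd_one_right]
        simp [pvNontrivialGCD, hg]
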